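-- pv_equiv track=rewrite | github.com/WillyMaikowski/cc5509 | digitRecognition/utils.py | mBlackBottomLeft
-- ===== SOURCE A (Python) =====
-- BACKGROUND = 240
--
-- FOREGROUND = 0
--
-- MARKED = 1
--
-- def mBlackBottomLeft( img ):
--     aux = img.copy()
--     for i in range( len( aux )-2, -1, -1 ):
--         for j in range( len( aux[i] ) ):
--             if i+1>= len(img) or j-1 < 0 or aux[i][j] == FOREGROUND:
--                 continue
--             elif aux[i][j] == BACKGROUND and ( aux[i + 1][j - 1] == FOREGROUND or aux[i + 1][j - 1] == MARKED ):
--                 aux[i][j] = MARKED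
--     return aux
-- ===== SOURCE B (Python) =====
-- BACKGROUND = 240
--
-- FOREGROUND = 0
--
-- MARKED = 1
--
-- # Anti-diagonal sweep: each cell depends only on its below-left neighbour, which
-- # lies on the same anti-diagonal (constant i+j), so the grid is processed one
-- # diagonal at a time, walking bottom-up and carrying a single scalar `below`
-- # (the processed value of the previous cell of the diagonal) instead of nested
-- # row/column index loops reading neighbours back out of the grid.
-- # (A mutates img's rows in place through its shallow copy; B does not -- the
-- # equivalence claimed is about the return value.)
-- def mBlackBottomLeft(img):
--     out = [list(r) for r in img]
--     n = len(img)
--     D = 0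
--     for i, r in enumerate(img):
--         D = max(D, i + len(r))
--     for d in range(D):
--         below = None
--         for i in range(n - 1, -1, -1):
--             j = d - i
--             if 0 <= j < len(out[i]):
--                 v = out[i][j]
--                 if i < n - 1 and j >= 1 and v == BACKGROUND and below in (FOREGROUND, MARKED):
--                     out[i][j] = MARKED
--                     below = MARKED
--                 else:
--                     below = v
--             else:
--                 below = None
--     return out
-- ===== Notes on version B (the rewrite author's own statement) =====
-- stated objective: alternative
-- what changed: Processes the grid by anti-diagonals (constant i+j): each cell depends only on its below-left neighbour, which lies on the same diagonal, so B walks every diagonal bottom-up carrying one scalar 'below' instead of A's nested row/column index loops that read neighbour cells back out of the grid.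
-- crash fix: On jagged grids where some BACKGROUND cell (i,j) with j>=1, i<len-1 has no below-left neighbour (len(img[i+1]) <= j-1), A raises IndexError; B simply leaves such cells unmarked and returns the grid. — e.g. on mBlackBottomLeft([[240, 240], []]): A raises IndexError, B returns [[240, 240], []]
import Mathlib
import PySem

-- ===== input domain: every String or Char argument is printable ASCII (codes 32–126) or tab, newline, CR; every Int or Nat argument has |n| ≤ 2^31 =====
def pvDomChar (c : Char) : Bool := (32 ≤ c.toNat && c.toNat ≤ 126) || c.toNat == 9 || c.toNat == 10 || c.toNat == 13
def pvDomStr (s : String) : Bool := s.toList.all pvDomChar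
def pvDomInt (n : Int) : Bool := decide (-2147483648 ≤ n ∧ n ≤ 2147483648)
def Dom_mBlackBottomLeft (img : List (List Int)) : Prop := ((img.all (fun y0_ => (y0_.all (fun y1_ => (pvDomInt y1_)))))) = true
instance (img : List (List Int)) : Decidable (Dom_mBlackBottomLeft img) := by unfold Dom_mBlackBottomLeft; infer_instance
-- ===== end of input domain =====

-- B processes the grid by anti-diagonals (constant i+j), walking each diagonal bottom-up with one
-- carried scalar, instead of A's nested row/column loops; equivalence is about the RETURN value
-- (A also mutates img's rows in place through its shallow copy, B does not).


-- ===== PORT A =====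
-- body of A's inner loop; the read aux[i+1][j-1] is pyGetD with default 2: where the index is
-- out of range Python raises IndexError, which Pre_ excludes (2 is neither FOREGROUND nor MARKED)
def aInner (img : List (List Int)) (i : Int) (aux2 : List (List Int)) (j : Int) : List (List Int) :=
  if i + 1 ≥ (img.length : Int) ∨ j - 1 < 0 ∨ PySem.List.pyGetD (PySem.List.pyGetD aux2 i []) j 0 = 0 then
    aux2
  else if PySem.List.pyGetD (PySem.List.pyGetD aux2 i []) j 0 = 240 ∧
      (PySem.List.pyGetD (PySem.List.pyGetD aux2 (i + 1) []) (j - 1) 2 = 0 ∨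
       PySem.List.pyGetD (PySem.List.pyGetD aux2 (i + 1) []) (j - 1) 2 = 1) then
    PySem.List.pySetD aux2 i (PySem.List.pySetD (PySem.List.pyGetD aux2 i []) j 1)
  else aux2

-- body of A's outer loop: for j in range(len(aux[i])): …
def aOuter (img : List (List Int)) (aux : List (List Int)) (i : Int) : List (List Int) :=
  (PySem.List.pyRange 0 ((PySem.List.pyGetD aux i []).length : Int) 1).foldl (aInner img i) aux

def mBlackBottomLeft (img : List (List Int)) : List (List Int) :=
  (PySem.List.pyRange ((img.length : Int) - 2) (-1) (-1)).foldl (aOuter img) img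

-- ===== PORT B =====
-- body of B's inner loop: one step of the bottom-up walk along anti-diagonal d;
-- state = (grid so far, `below` = processed value of the previous diagonal cell, None if absent)
def bInner (n : Nat) (d : Int) (st : List (List Int) × Option Int) (i : Int) :
    List (List Int) × Option Int :=
  if 0 ≤ d - i ∧ d - i < ((PySem.List.pyGetD st.1 i []).length : Int) then
    if i < (n : Int) - 1 ∧ 1 ≤ d - i ∧
        PySem.List.pyGetD (PySem.List.pyGetD st.1 i []) (d - i) 0 = 240 ∧
        (st.2 = some 0 ∨ st.2 = some 1) then
      (PySem.List.pySetD st.1 i (PySem.List.pySetD (PySem.List.pyGetD st.1 i []) (d - i) 1),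
       some 1)
    else (st.1, some (PySem.List.pyGetD (PySem.List.pyGetD st.1 i []) (d - i) 0))
  else (st.1, none)

-- B's loop over one diagonal: for i in range(n-1, -1, -1): …
def bDiag (n : Nat) (out : List (List Int)) (d : Int) : List (List Int) :=
  ((PySem.List.pyRange ((n : Int) - 1) (-1) (-1)).foldl (bInner n d) (out, none)).1

-- Python's `out = [list(r) for r in img]` is a copy, the identity on immutable Lean lists
def mBlackBottomLeft_alt (img : List (List Int)) : List (List Int) :=
  let D := (PySem.List.enumerate img).foldl (fun acc ir => max acc (ir.1 + (ir.2.length : Int))) 0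
  (PySem.List.pyRange 0 D 1).foldl (bDiag img.length) img

-- ===== PRECONDITION & SPEC =====
-- Pre_ excludes exactly the inputs on which A raises IndexError: a BACKGROUND cell (i,j),
-- j ≥ 1, i above the last row, whose below-left neighbour (i+1, j-1) does not exist.
def Pre_mBlackBottomLeft (img : List (List Int)) : Prop :=
  ∀ i ∈ List.range (img.length - 1), ∀ j ∈ List.range ((img.getD i []).length),
    1 ≤ j → (img.getD i []).getD j 0 = 240 → j - 1 < (img.getD (i + 1) []).length
instance (img : List (List Int)) : Decidable (Pre_mBlackBottomLeft img) := by unfold Pre_mBlackBottomLeft; infer_instance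
def pvWitness_mBlackBottomLeft : List (List Int) := [[240, 240], [0, 5]]

-- On jagged grids where some BACKGROUND cell (i,j) with j ≥ 1, i < len-1 has no below-left
-- neighbour (len(img[i+1]) ≤ j-1), A raises IndexError; B leaves such cells unmarked and returns.
def Raises_mBlackBottomLeft (img : List (List Int)) : Prop :=
  ∃ i ∈ List.range (img.length - 1), ∃ j ∈ List.range ((img.getD i []).length),
    1 ≤ j ∧ (img.getD i []).getD j 0 = 240 ∧ (img.getD (i + 1) []).length ≤ j - 1
instance (img : List (List Int)) : Decidable (Raises_mBlackBottomLeft img) := by unfold Raises_mBlackBottomLeft; infer_instance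
def pvRaiseWitness_mBlackBottomLeft : List (List Int) := [[240, 240], []]
def pvRaiseWitnessOut_mBlackBottomLeft : List (List Int) := [[240, 240], []]

def Spec_mBlackBottomLeft (img : List (List Int)) (out : List (List Int)) : Prop := out = mBlackBottomLeft_alt img
instance (img : List (List Int)) (out : List (List Int)) : Decidable (Spec_mBlackBottomLeft img out) := by unfold Spec_mBlackBottomLeft; infer_instance

-- ===== CLAIM (what is proved, stated in full; the proofs are below) =====
def Claim_equal_mBlackBottomLeft : Prop := ∀ (img : List (List Int)), Dom_mBlackBottomLeft img → Pre_mBlackBottomLeft img → Spec_mBlackBottomLeft img (mBlackBottomLeft img)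
def Claim_raises_mBlackBottomLeft : Prop := (∀ (img : List (List Int)), Dom_mBlackBottomLeft img → Raises_mBlackBottomLeft img → ¬ Pre_mBlackBottomLeft img) ∧ (Dom_mBlackBottomLeft (pvRaiseWitness_mBlackBottomLeft) ∧ Raises_mBlackBottomLeft (pvRaiseWitness_mBlackBottomLeft) ∧ mBlackBottomLeft_alt (pvRaiseWitness_mBlackBottomLeft) = pvRaiseWitnessOut_mBlackBottomLeft)

-- ===== LEMMAS AND PROOFS =====

-- the common functional description: mark rows bottom-up, each from the marked row below it
def bRow (below row : List Int) : List Int :=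
  (PySem.List.enumerate row).map (fun jv =>
    if 0 < jv.1 ∧ jv.2 = 240 ∧ jv.1 - 1 < (below.length : Int) ∧
        (PySem.List.pyGetD below (jv.1 - 1) 0 = 0 ∨ PySem.List.pyGetD below (jv.1 - 1) 0 = 1)
    then 1 else jv.2)

def mark : List (List Int) → List (List Int)
  | [] => []
  | r :: rest =>
    match mark rest with
    | [] => [r]
    | b :: bs => bRow b r :: b :: bs

lemma mark_eq_nil_iff (L : List (List Int)) : mark L = [] ↔ L = [] := by
  cases L with
  | nil => simp [mark]
  | cons r rest =>
    simp only [mark]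
    cases mark rest <;> simp

lemma mark_length (L : List (List Int)) : (mark L).length = L.length := by
  induction L with
  | nil => rfl
  | cons r rest ih =>
    simp only [mark]
    cases h : mark rest with
    | nil => simp [← ih, h]
    | cons b bs => simp [← ih, h]

lemma length_bRow (b r : List Int) : (bRow b r).length = r.length := by
  simp [bRow, PySem.List.length_enumerate]

lemma mark_cons (r : List Int) (rest : List (List Int)) (b : List Int) (bs : List (List Int))
    (h : mark rest = b :: bs) : mark (r :: rest) = bRow b r :: b :: bs := by
  simp only [mark, h]

lemma mark_cons_getD (r : List Int) (rest : List (List Int)) (i : Nat) :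
    (mark (r :: rest)).getD (i + 1) [] = (mark rest).getD i [] := by
  simp only [mark]
  cases h : mark rest with
  | nil =>
    have : rest = [] := (mark_eq_nil_iff _).mp h
    subst this
    simp [mark]
  | cons b bs => simp

lemma mark_row_length (L : List (List Int)) : ∀ i : Nat, i < L.length →
    ((mark L).getD i []).length = (L.getD i []).length := by
  induction L with
  | nil => intro i hi; simp at hi
  | cons r rest ih =>
    intro i hi
    cases i with
    | zero =>
      simp only [mark]
      cases h : mark rest with
      | nil => simp
      | cons b bs => simp [length_bRow]
    | succ i =>
      rw [mark_cons_getD, List.getD_cons_succ]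
      exact ih i (by simp at hi; omega)

-- final value of cell (i, j)
def mcell (img : List (List Int)) (i j : Nat) : Int := ((mark img).getD i []).getD j 0

lemma mcell_shift (r : List Int) (rest : List (List Int)) (i j : Nat) :
    mcell (r :: rest) (i + 1) j = mcell rest i j := by
  unfold mcell
  rw [mark_cons_getD]

-- the pointwise recurrence satisfied by mark
lemma mark_rec (img : List (List Int)) : ∀ (i : Nat), ∀ (j : Nat), i < img.length →
    j < (img.getD i []).length →
    mcell img i j =
      if i + 1 < img.length ∧ 1 ≤ j ∧ (img.getD i []).getD j 0 = 240 ∧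
          j - 1 < (img.getD (i + 1) []).length ∧
          (mcell img (i + 1) (j - 1) = 0 ∨ mcell img (i + 1) (j - 1) = 1)
      then 1 else (img.getD i []).getD j 0 := by
  induction img with
  | nil => intro i j hi; simp at hi
  | cons r rest ih =>
    intro i j hi hj
    cases i with
    | zero =>
      simp only [List.getD_cons_zero] at hj ⊢
      cases rest with
      | nil =>
        rw [if_neg (by simp)]
        unfold mcell
        simp [mark]
      | cons b0 rs =>
        obtain ⟨mb, ms, hM⟩ : ∃ mb ms, mark (b0 :: rs) = mb :: ms := by
          cases h : mark (b0 :: rs) with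
          | nil => exact absurd ((mark_eq_nil_iff _).mp h) (by simp)
          | cons mb ms => exact ⟨mb, ms, rfl⟩
        have hmb : (mark (b0 :: rs)).getD 0 [] = mb := by rw [hM]; rfl
        have hmblen : mb.length = b0.length := by
          have := mark_row_length (b0 :: rs) 0 (by simp)
          rwa [hmb, List.getD_cons_zero] at this
        have hcell : mcell (r :: b0 :: rs) 0 j = (bRow mb r).getD j 0 := by
          unfold mcell
          rw [mark_cons r (b0 :: rs) mb ms hM]
          rfl
        have hshift : mcell (r :: b0 :: rs) 1 (j - 1) = mb.getD (j - 1) 0 := by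
          rw [show (1 : Nat) = 0 + 1 from rfl, mcell_shift]
          unfold mcell
          rw [hmb]
        rw [hcell, hshift]
        have hjb : j < (bRow mb r).length := by rw [length_bRow]; exact hj
        rw [List.getD_eq_getElem _ _ hjb, List.getD_eq_getElem r 0 hj]
        simp only [bRow, List.getElem_map, PySem.List.getElem_enumerate]
        by_cases hj1 : 1 ≤ j
        · have hc : ((0 : Int) + (j : Nat)) - 1 = ((j - 1 : Nat) : Int) := by push_cast; omega
          rw [hc, PySem.List.pyGetD_natCast]
          by_cases hlt : j - 1 < b0.length
          · refine if_congr ?_ rfl rfl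
            constructor
            · rintro ⟨h1, h2, h3, h4⟩
              refine ⟨by simp, hj1, h2, ?_, h4⟩
              simpa using hlt
            · rintro ⟨h1, h2, h3, h4, h5⟩
              exact ⟨by omega, h3, by rw [hmblen]; exact_mod_cast (by exact_mod_cast hlt : ((j-1:Nat):Int) < (b0.length:Int)), h5⟩
          · rw [if_neg (by rintro ⟨h1, h2, h3, h4⟩; rw [hmblen] at h3; omega),
              if_neg (by rintro ⟨h1, h2, h3, h4, h5⟩; simp at h4; omega)]
        · rw [if_neg (by rintro ⟨h1, h2⟩; omega), if_neg (by rintro ⟨h1, h2⟩; omega)]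
    | succ i =>
      simp only [List.length_cons] at hi
      rw [List.getD_cons_succ] at hj
      rw [mcell_shift, show i + 1 + 1 = (i + 1) + 1 from rfl, mcell_shift]
      rw [List.getD_cons_succ, List.getD_cons_succ]
      rw [ih i j (by omega) hj]
      refine if_congr ?_ rfl rfl
      constructor
      · rintro ⟨h1, h⟩; exact ⟨by simp; omega, h⟩
      · rintro ⟨h1, h⟩; exact ⟨by simp at h1; omega, h⟩

-- ===== A-side: A computes mark (bottom-up row loop invariant) =====

-- partially marked row: positions < t processed
def pRow (b r : List Int) (t : Nat) : List Int :=
  r.mapIdx (fun j v =>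
    if j < t ∧ 0 < (j:Int) ∧ v = 240 ∧ (j:Int) - 1 < (b.length : Int) ∧
        (PySem.List.pyGetD b ((j:Int) - 1) 0 = 0 ∨ PySem.List.pyGetD b ((j:Int) - 1) 0 = 1)
    then 1 else v)

lemma pRow_zero (b r : List Int) : pRow b r 0 = r := by
  apply List.ext_getElem (by simp [pRow])
  intro k h1 h2
  simp [pRow]

lemma length_pRow (b r : List Int) (t : Nat) : (pRow b r t).length = r.length := by
  simp [pRow]

lemma bRow_eq_pRow (b r : List Int) : bRow b r = pRow b r r.length := by
  apply List.ext_getElem (by simp [bRow, pRow, PySem.List.length_enumerate])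
  intro k h1 h2
  have hk : k < r.length := by simpa [bRow, PySem.List.length_enumerate] using h1
  simp [bRow, pRow, PySem.List.getElem_enumerate, hk]

lemma cond_defaults (b : List Int) (k : Int) (hk : 0 ≤ k) :
    (PySem.List.pyGetD b k 2 = 0 ∨ PySem.List.pyGetD b k 2 = 1) ↔
      (k < (b.length : Int) ∧ (PySem.List.pyGetD b k 0 = 0 ∨ PySem.List.pyGetD b k 0 = 1)) := by
  by_cases h : k < (b.length : Int)
  · rw [PySem.List.pyGetD_eq_getElem b 2 hk h, PySem.List.pyGetD_eq_getElem b 0 hk h]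
    simp [h]
  · have hnone : PySem.List.pyGet? b k = none := by
      rw [PySem.List.pyGet?_eq_none_iff]
      simp only [PySem.Raise.InRange]
      omega
    rw [PySem.List.pyGetD_of_none _ _ _ hnone]
    simp [h]

lemma pRow_succ (b r : List Int) (t : Nat) (ht : t < r.length) :
    pRow b r (t + 1) =
      if 0 < (t:Int) ∧ r.getD t 0 = 240 ∧ (t:Int) - 1 < (b.length : Int) ∧
          (PySem.List.pyGetD b ((t:Int) - 1) 0 = 0 ∨ PySem.List.pyGetD b ((t:Int) - 1) 0 = 1)
      then (pRow b r t).set t 1 else pRow b r t := by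
  have hgetD : r.getD t 0 = r[t] := List.getD_eq_getElem r 0 ht
  by_cases hC : 0 < (t:Int) ∧ r.getD t 0 = 240 ∧ (t:Int) - 1 < (b.length : Int) ∧
      (PySem.List.pyGetD b ((t:Int) - 1) 0 = 0 ∨ PySem.List.pyGetD b ((t:Int) - 1) 0 = 1)
  · rw [if_pos hC]
    apply List.ext_getElem (by simp [length_pRow])
    intro k h1 h2
    have hk : k < r.length := by simpa [length_pRow] using h1
    rw [List.getElem_set]
    simp only [pRow, List.getElem_mapIdx]
    rcases eq_or_ne t k with rfl | hne
    · rw [if_pos rfl, if_pos ⟨by omega, hC.1, hgetD ▸ hC.2.1, hC.2.2⟩]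
    · rw [if_neg hne]
      exact if_congr ⟨fun h => ⟨by omega, h.2⟩, fun h => ⟨by omega, h.2⟩⟩ rfl rfl
  · rw [if_neg hC]
    apply List.ext_getElem (by simp [length_pRow])
    intro k h1 h2
    have hk : k < r.length := by simpa [length_pRow] using h1
    simp only [pRow, List.getElem_mapIdx]
    rcases eq_or_ne t k with rfl | hne
    · rw [if_neg (by rintro ⟨-, hp, h240, hrest⟩; exact hC ⟨hp, hgetD.trans h240, hrest⟩),
        if_neg (by rintro ⟨-, hp, h240, hrest⟩; exact hC ⟨hp, hgetD.trans h240, hrest⟩)]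
    · exact if_congr ⟨fun h => ⟨by omega, h.2⟩, fun h => ⟨by omega, h.2⟩⟩ rfl rfl

lemma inner_fold (img : List (List Int)) (m : Nat) (aux : List (List Int)) (b r : List Int)
    (hlen : m < aux.length)
    (hm : PySem.List.pyGetD aux (m:Int) [] = r)
    (hb : PySem.List.pyGetD aux ((m:Int)+1) [] = b)
    (hn : (m:Int) + 1 < (img.length:Int)) :
    ∀ t : Nat, t ≤ r.length →
      (PySem.List.pyRange 0 (t:Int) 1).foldl (aInner img (m:Int)) aux
        = PySem.List.pySetD aux (m:Int) (pRow b r t) := by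
  intro t
  induction t with
  | zero =>
    intro _
    have hr : r = aux[m] := by
      rw [← hm, PySem.List.pyGetD_natCast, List.getD_eq_getElem aux [] hlen]
    rw [Nat.cast_zero, PySem.List.pyRange_one_eq_nil (le_refl 0)]
    rw [pRow_zero, PySem.List.pySetD_natCast, hr, List.set_getElem_self]
    rfl
  | succ t ih =>
    intro ht
    have htr : t < r.length := by omega
    have hcast : ((t+1:Nat):Int) = (t:Int) + 1 := by push_cast; ring
    rw [hcast, PySem.List.pyRange_one_succ_right (Int.natCast_nonneg t), List.foldl_append,
      ih (by omega), List.foldl_cons, List.foldl_nil]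
    have h1 : PySem.List.pyGetD (PySem.List.pySetD aux (↑m) (pRow b r t)) (↑m) [] = pRow b r t := by
      rw [PySem.List.pyGetD_pySetD_natCast _ _ _ _ _ hlen, if_pos rfl]
    have h2 : PySem.List.pyGetD (PySem.List.pySetD aux (↑m) (pRow b r t)) ((m:Int)+1) [] = b := by
      have hc : ((m:Int)+1) = ((m+1:Nat):Int) := by push_cast; ring
      rw [hc, PySem.List.pyGetD_pySetD_natCast _ _ _ _ _ hlen, if_neg (by omega), ← hc]
      exact hb
    have hv : PySem.List.pyGetD (pRow b r t) (↑t) 0 = r.getD t 0 := by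
      rw [PySem.List.pyGetD_natCast, List.getD_eq_getElem _ _ (by simpa [length_pRow] using htr),
        List.getD_eq_getElem r 0 htr]
      simp only [pRow, List.getElem_mapIdx]
      rw [if_neg (by omega)]
    unfold aInner
    rw [h1, h2, hv, pRow_succ b r t htr]
    set v := r.getD t 0 with hvdef
    by_cases hskip : ((t:Int) - 1 < 0 ∨ v = 0)
    · rw [if_pos (Or.inr hskip)]
      rw [if_neg (by rintro ⟨hc1, hc2, -⟩; rcases hskip with h | h <;> omega)]
    · have hs := not_or.mp hskip
      have hknn : (0:Int) ≤ (t:Int) - 1 := by have := hs.1; omega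
      rw [if_neg (by
        rintro (h | h | h)
        · omega
        · exact hs.1 h
        · exact hs.2 h)]
      by_cases hmark : v = 240 ∧
          (PySem.List.pyGetD b ((t:Int) - 1) 2 = 0 ∨ PySem.List.pyGetD b ((t:Int) - 1) 2 = 1)
      · rw [if_pos hmark]
        have hC := (cond_defaults b ((t:Int) - 1) hknn).mp hmark.2
        rw [if_pos ⟨by have := hs.1; omega, hmark.1, hC.1, hC.2⟩]
        simp only [PySem.List.pySetD_natCast, List.set_set]
      · rw [if_neg hmark]
        rw [if_neg (by
          rintro ⟨-, hc2, hc3, hc4⟩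
          exact hmark ⟨hc2, (cond_defaults b ((t:Int) - 1) hknn).mpr ⟨hc3, hc4⟩⟩)]

lemma aOuter_S (img : List (List Int)) (m : Nat) (hm1 : m + 1 < img.length) :
    aOuter img (img.take (m+1) ++ mark (img.drop (m+1))) (m:Int)
      = img.take m ++ mark (img.drop m) := by
  have hmlen : m < img.length := by omega
  have hLne : img.drop (m+1) ≠ [] := by
    simp only [ne_eq, List.drop_eq_nil_iff]
    omega
  obtain ⟨b, bs, hML⟩ : ∃ b bs, mark (img.drop (m+1)) = b :: bs := by
    cases h : mark (img.drop (m+1)) with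
    | nil => exact absurd ((mark_eq_nil_iff _).mp h) hLne
    | cons b bs => exact ⟨b, bs, rfl⟩
  have htake : (img.take (m+1)).length = m + 1 := by
    simp [List.length_take]; omega
  have hauxlen : (img.take (m+1) ++ mark (img.drop (m+1))).length = img.length := by
    simp [htake, mark_length]
    omega
  have hm' : PySem.List.pyGetD (img.take (m+1) ++ mark (img.drop (m+1))) (↑m) [] = img[m] := by
    rw [PySem.List.pyGetD_natCast, List.getD_append _ _ _ _ (by omega),
      List.getD_eq_getElem _ _ (by omega)]
    simp
  have hb' : PySem.List.pyGetD (img.take (m+1) ++ mark (img.drop (m+1))) ((m:Int)+1) [] = b := by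
    have hc : ((m:Int)+1) = ((m+1:Nat):Int) := by push_cast; ring
    rw [hc, PySem.List.pyGetD_natCast, List.getD_append_right _ _ _ _ (by omega), htake]
    simp [hML]
  unfold aOuter
  rw [hm']
  rw [inner_fold img m _ b img[m] (by omega) hm' hb' (by exact_mod_cast hm1) img[m].length (le_refl _)]
  rw [← bRow_eq_pRow, PySem.List.pySetD_natCast, hML]
  have hdrop : img.drop m = img[m] :: img.drop (m+1) := List.drop_eq_getElem_cons hmlen
  rw [hdrop]
  have hmark2 : mark (img[m] :: img.drop (m+1)) = bRow b img[m] :: b :: bs := by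
    simp [mark, hML]
  rw [hmark2]
  rw [List.take_succ_eq_append_getElem hmlen, List.append_assoc,
    List.set_append_right _ _ (by simp only [List.length_take]; omega)]
  have : m - (img.take m).length = 0 := by simp only [List.length_take]; omega
  rw [this]
  simp

lemma outer_fold (img : List (List Int)) : ∀ m : Nat, m < img.length →
    (PySem.List.pyRange ((m:Int) - 1) (-1) (-1)).foldl (aOuter img)
      (img.take m ++ mark (img.drop m)) = mark img := by
  intro m
  induction m with
  | zero =>
    intro _
    rw [PySem.List.pyRange_neg_one_eq_nil (by norm_num)]
    simp
  | succ m ih =>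
    intro h
    have hc : ((m+1:Nat):Int) - 1 = (m:Int) := by push_cast; ring
    rw [hc, PySem.List.pyRange_neg_one_cons (by omega), List.foldl_cons, aOuter_S img m h,
      ih (by omega)]

lemma a_eq_mark (img : List (List Int)) : mBlackBottomLeft img = mark img := by
  unfold mBlackBottomLeft
  rcases Nat.eq_zero_or_pos img.length with h0 | hpos
  · have himg : img = [] := List.length_eq_zero_iff.mp h0
    subst himg
    rw [PySem.List.pyRange_neg_one_eq_nil (by norm_num)]
    rfl
  · have hm : img.length - 1 < img.length := by omega
    have hcast : (img.length:Int) - 2 = ((img.length - 1 : Nat):Int) - 1 := by omega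
    have hS : img.take (img.length - 1) ++ mark (img.drop (img.length - 1)) = img := by
      have hsucc : img.length - 1 + 1 = img.length := by omega
      have hd : img.drop (img.length - 1) = [img[img.length - 1]] := by
        rw [List.drop_eq_getElem_cons hm, hsucc, List.drop_length]
      rw [hd]
      have : mark [img[img.length - 1]] = [img[img.length - 1]] := rfl
      rw [this, ← List.take_succ_eq_append_getElem hm, hsucc, List.take_length]
    have hof := outer_fold img (img.length - 1) hm
    rw [hS] at hof
    rw [hcast]
    exact hof

-- ===== B-side: the diagonal sweep computes mark =====

-- grid with cell (i,j) processed (holding mcell) iff i+j < d, or i+j = d and t ≤ i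
def G (img : List (List Int)) (d : Int) (t : Nat) : List (List Int) :=
  img.mapIdx (fun i r => r.mapIdx (fun j v =>
    if (i:Int) + (j:Int) < d ∨ ((i:Int) + (j:Int) = d ∧ t ≤ i) then mcell img i j else v))

-- the carried scalar before processing cell (t, d-t): value of cell (t, d-t) if it exists
def belowOpt (img : List (List Int)) (d : Int) (t : Nat) : Option Int :=
  if t < img.length ∧ 0 ≤ d - (t:Int) ∧ d - (t:Int) < ((img.getD t []).length : Int)
  then some (mcell img t (d - (t:Int)).toNat) else none

lemma length_G (img : List (List Int)) (d : Int) (t : Nat) : (G img d t).length = img.length := by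
  simp [G]

lemma getD_G (img : List (List Int)) (d : Int) (t : Nat) (i : Nat) (hi : i < img.length) :
    (G img d t).getD i [] = (img.getD i []).mapIdx (fun j v =>
      if (i:Int) + (j:Int) < d ∨ ((i:Int) + (j:Int) = d ∧ t ≤ i) then mcell img i j else v) := by
  rw [List.getD_eq_getElem _ _ (by simpa [length_G] using hi), List.getD_eq_getElem img [] hi]
  simp [G]

-- when the diagonal cell of row t already carries its final value, the frontier moves for free
lemma G_succ (img : List (List Int)) (d : Int) (t : Nat)
    (h : ∀ jn : Nat, jn < (img.getD t []).length → (t:Int) + (jn:Int) = d →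
      (img.getD t []).getD jn 0 = mcell img t jn) :
    G img d t = G img d (t+1) := by
  apply List.ext_getElem (by simp [length_G])
  intro i h1 h2
  have hi : i < img.length := by simpa [length_G] using h1
  apply List.ext_getElem (by simp [G])
  intro j hj1 hj2
  have hjl : j < img[i].length := by simpa [G] using hj1
  simp only [G, List.getElem_mapIdx]
  by_cases hit : i = t ∧ (i:Int) + (j:Int) = d
  · obtain ⟨rfl, hd⟩ := hit
    have hjl' : j < (img.getD i []).length := by rw [List.getD_eq_getElem img [] hi]; exact hjl
    have hval := h j hjl' hd
    rw [List.getD_eq_getElem img [] hi, List.getD_eq_getElem _ 0 hjl] at hval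
    rw [if_pos (Or.inr ⟨hd, le_refl i⟩)]
    by_cases hc : (i:Int) + (j:Int) < d ∨ ((i:Int) + (j:Int) = d ∧ i + 1 ≤ i)
    · rw [if_pos hc]
    · rw [if_neg hc, ← hval]
  · apply if_congr ?_ rfl rfl
    constructor
    · rintro (hlt | ⟨heq, hti⟩)
      · exact Or.inl hlt
      · rcases eq_or_ne i t with rfl | hne
        · exact absurd ⟨rfl, heq⟩ hit
        · exact Or.inr ⟨heq, by omega⟩
    · rintro (hlt | ⟨heq, hti⟩)
      · exact Or.inl hlt
      · exact Or.inr ⟨heq, by omega⟩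

-- marking the diagonal cell of row t with its final value moves the frontier
lemma G_set (img : List (List Int)) (d : Int) (t jn : Nat) (ht : t < img.length)
    (hj : jn < (img.getD t []).length) (hd : (t:Int) + (jn:Int) = d) :
    G img d t = (G img d (t+1)).set t
      (((img.getD t []).mapIdx (fun j v =>
        if (t:Int) + (j:Int) < d ∨ ((t:Int) + (j:Int) = d ∧ t + 1 ≤ t) then mcell img t j
        else v)).set jn (mcell img t jn)) := by
  apply List.ext_getElem (by simp [length_G])
  intro i h1 h2
  have hi : i < img.length := by simpa [length_G] using h1
  rw [List.getElem_set]
  by_cases hit : i = t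
  · subst hit
    rw [if_pos rfl, List.getD_eq_getElem img [] hi]
    apply List.ext_getElem (by simp [G])
    intro j hj1 hj2
    have hjl : j < img[i].length := by simpa [G] using hj1
    rw [List.getElem_set]
    simp only [G, List.getElem_mapIdx]
    by_cases hjj : j = jn
    · subst hjj
      rw [if_pos rfl, if_pos (Or.inr ⟨hd, le_refl i⟩)]
    · rw [if_neg (show ¬ jn = j from fun h => hjj h.symm)]
      apply if_congr ?_ rfl rfl
      constructor
      · rintro (hlt | ⟨heq, hti⟩)
        · exact Or.inl hlt
        · exact absurd (by omega : j = jn) hjj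
      · rintro (hlt | ⟨heq, hti⟩)
        · exact Or.inl hlt
        · omega
  · rw [if_neg (show ¬ t = i from fun h => hit h.symm)]
    apply List.ext_getElem (by simp [G])
    intro j hj1 hj2
    simp only [G, List.getElem_mapIdx]
    apply if_congr ?_ rfl rfl
    constructor
    · rintro (hlt | ⟨heq, hti⟩)
      · exact Or.inl hlt
      · exact Or.inr ⟨heq, by omega⟩
    · rintro (hlt | ⟨heq, hti⟩)
      · exact Or.inl hlt
      · exact Or.inr ⟨heq, by omega⟩

lemma bInner_step (img : List (List Int)) (d : Int) (t : Nat) (ht : t < img.length) :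
    bInner img.length d (G img d (t+1), belowOpt img d (t+1)) (t:Int)
      = (G img d t, belowOpt img d t) := by
  have hget : PySem.List.pyGetD (G img d (t+1)) (t:Int) []
      = (img.getD t []).mapIdx (fun j v =>
          if (t:Int) + (j:Int) < d ∨ ((t:Int) + (j:Int) = d ∧ t + 1 ≤ t) then mcell img t j
          else v) := by
    rw [PySem.List.pyGetD_natCast, getD_G img d (t+1) t ht]
  simp only [bInner, hget, List.length_mapIdx]
  by_cases hin : 0 ≤ d - (t:Int) ∧ d - (t:Int) < (((img.getD t []).length : Nat) : Int)
  · rw [if_pos hin]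
    obtain ⟨hge, hlt⟩ := hin
    have hjcast : (((d - (t:Int)).toNat : Nat) : Int) = d - (t:Int) := Int.toNat_of_nonneg hge
    set jn := (d - (t:Int)).toNat with hjndef
    have hd : (t:Int) + (jn:Int) = d := by omega
    have hjlen : jn < (img.getD t []).length := by omega
    have hv : PySem.List.pyGetD ((img.getD t []).mapIdx (fun j v =>
        if (t:Int) + (j:Int) < d ∨ ((t:Int) + (j:Int) = d ∧ t + 1 ≤ t) then mcell img t j
        else v)) (d - (t:Int)) 0 = (img.getD t []).getD jn 0 := by
      rw [← hjcast, PySem.List.pyGetD_natCast,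
        List.getD_eq_getElem _ _ (by simpa using hjlen), List.getElem_mapIdx,
        if_neg (by omega), List.getD_eq_getElem _ 0 hjlen]
    have hbelow : belowOpt img d (t+1)
        = if t + 1 < img.length ∧ 1 ≤ jn ∧ jn - 1 < (img.getD (t+1) []).length
          then some (mcell img (t+1) (jn - 1)) else none := by
      unfold belowOpt
      by_cases hc : t + 1 < img.length ∧ 1 ≤ jn ∧ jn - 1 < (img.getD (t+1) []).length
      · rw [if_pos (by push_cast; omega), if_pos hc]
        have : (d - ((t+1:Nat):Int)).toNat = jn - 1 := by push_cast; omega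
        rw [this]
      · rw [if_neg (by push_cast; omega), if_neg hc]
    have hrec := mark_rec img t jn ht hjlen
    by_cases hC : t + 1 < img.length ∧ 1 ≤ jn ∧ (img.getD t []).getD jn 0 = 240 ∧
        jn - 1 < (img.getD (t+1) []).length ∧
        (mcell img (t+1) (jn - 1) = 0 ∨ mcell img (t+1) (jn - 1) = 1)
    · rw [if_pos (by
        refine ⟨by push_cast; omega, by omega, by rw [hv]; exact hC.2.2.1, ?_⟩
        rw [hbelow, if_pos ⟨hC.1, hC.2.1, hC.2.2.2.1⟩]
        rcases hC.2.2.2.2 with h | h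
        · exact Or.inl (by rw [h])
        · exact Or.inr (by rw [h]))]
      have hmc1 : mcell img t jn = 1 := by rw [hrec, if_pos hC]
      have hgrid : G img d t = (G img d (t+1)).set t
          (((img.getD t []).mapIdx (fun j v =>
            if (t:Int) + (j:Int) < d ∨ ((t:Int) + (j:Int) = d ∧ t + 1 ≤ t) then mcell img t j
            else v)).set jn 1) := by
        rw [← hmc1]
        exact G_set img d t jn ht hjlen hd
      have hbt : belowOpt img d t = some 1 := by
        unfold belowOpt
        rw [if_pos ⟨ht, hge, by exact_mod_cast hlt⟩, ← hjndef, hmc1]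
      rw [Prod.mk.injEq]
      refine ⟨?_, by rw [hbt]⟩
      rw [hgrid, PySem.List.pySetD_natCast, ← hjcast, PySem.List.pySetD_natCast]
    · rw [if_neg (by
        rintro ⟨hg1, hg2, hg3, hg4⟩
        rw [hv] at hg3
        rw [hbelow] at hg4
        by_cases hc : t + 1 < img.length ∧ 1 ≤ jn ∧ jn - 1 < (img.getD (t+1) []).length
        · rw [if_pos hc] at hg4
          refine hC ⟨hc.1, hc.2.1, hg3, hc.2.2, ?_⟩
          rcases hg4 with h | h
          · exact Or.inl (by injection h)
          · exact Or.inr (by injection h)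
        · rw [if_neg hc] at hg4
          rcases hg4 with h | h <;> simp at h)]
      have hmc : mcell img t jn = (img.getD t []).getD jn 0 := by rw [hrec, if_neg hC]
      have hgrid : G img d t = G img d (t+1) := by
        apply G_succ
        intro j' hj' hd'
        have : j' = jn := by omega
        subst this
        exact hmc.symm
      have hbt : belowOpt img d t = some ((img.getD t []).getD jn 0) := by
        unfold belowOpt
        rw [if_pos ⟨ht, hge, by exact_mod_cast hlt⟩, ← hjndef, hmc]
      rw [Prod.mk.injEq]
      exact ⟨hgrid.symm, by rw [hv, hbt]⟩
  · rw [if_neg (by push_cast at hin ⊢; exact hin)]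
    have hgrid : G img d t = G img d (t+1) := by
      apply G_succ
      intro jn hjn hd
      exact absurd ⟨by omega, by omega⟩ hin
    have hbt : belowOpt img d t = none := by
      unfold belowOpt
      rw [if_neg (by push_cast at hin ⊢; omega)]
    rw [Prod.mk.injEq]
    exact ⟨hgrid.symm, hbt.symm⟩

lemma inner_inv (img : List (List Int)) (d : Int) : ∀ t : Nat, t ≤ img.length →
    (PySem.List.pyRange ((t:Int) - 1) (-1) (-1)).foldl (bInner img.length d)
      (G img d t, belowOpt img d t) = (G img d 0, belowOpt img d 0) := by
  intro t
  induction t with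
  | zero =>
    intro _
    rw [PySem.List.pyRange_neg_one_eq_nil (by norm_num)]
    rfl
  | succ t ih =>
    intro h
    have hc : ((t+1:Nat):Int) - 1 = (t:Int) := by push_cast; ring
    rw [hc, PySem.List.pyRange_neg_one_cons (by omega), List.foldl_cons,
      bInner_step img d t (by omega), ih (by omega)]

lemma belowOpt_top (img : List (List Int)) (d : Int) : belowOpt img d img.length = none := by
  unfold belowOpt
  rw [if_neg (by omega)]

lemma G_zero_succ (img : List (List Int)) (d : Int) : G img d 0 = G img (d+1) img.length := by
  apply List.ext_getElem (by simp [length_G])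
  intro i h1 h2
  have hi : i < img.length := by simpa [length_G] using h1
  apply List.ext_getElem (by simp [G])
  intro j hj1 hj2
  simp only [G, List.getElem_mapIdx]
  apply if_congr ?_ rfl rfl
  constructor
  · rintro (h | ⟨h, _⟩) <;> exact Or.inl (by omega)
  · rintro (h | ⟨h, hn⟩)
    · rcases lt_or_ge ((i:Int) + (j:Int)) d with h' | h'
      · exact Or.inl h'
      · exact Or.inr ⟨by omega, by omega⟩
    · omega

lemma bDiag_G (img : List (List Int)) (d : Int) :
    bDiag img.length (G img d img.length) d = G img (d+1) img.length := by
  unfold bDiag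
  rw [show ((G img d img.length, (none : Option Int)) : List (List Int) × Option Int)
      = (G img d img.length, belowOpt img d img.length) by rw [belowOpt_top],
    inner_inv img d img.length (le_refl _), ← G_zero_succ]

lemma G_init (img : List (List Int)) : G img 0 img.length = img := by
  apply List.ext_getElem (by simp [length_G])
  intro i h1 h2
  have hi : i < img.length := by simpa [length_G] using h1
  apply List.ext_getElem (by simp [G])
  intro j hj1 hj2
  simp only [G, List.getElem_mapIdx]
  rw [if_neg (by omega)]

lemma outer_inv (img : List (List Int)) : ∀ e : Nat,
    (PySem.List.pyRange 0 (e:Int) 1).foldl (bDiag img.length) img = G img (e:Int) img.length := by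
  intro e
  induction e with
  | zero =>
    rw [Nat.cast_zero, PySem.List.pyRange_one_eq_nil (le_refl 0)]
    exact (G_init img).symm
  | succ e ih =>
    have hc : ((e+1:Nat):Int) = (e:Int) + 1 := by push_cast; ring
    rw [hc, PySem.List.pyRange_one_succ_right (Int.natCast_nonneg e), List.foldl_append,
      ih, List.foldl_cons, List.foldl_nil, bDiag_G]

lemma le_foldl_max (l : List (Int × List Int)) (acc : Int) :
    acc ≤ l.foldl (fun a p => max a (p.1 + (p.2.length : Int))) acc := by
  induction l generalizing acc with
  | nil => exact le_refl _
  | cons p ps ih => exact le_trans (le_max_left _ _) (ih _)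

lemma mem_le_foldl_max (l : List (Int × List Int)) (acc : Int) (p : Int × List Int) (hp : p ∈ l) :
    p.1 + (p.2.length : Int) ≤ l.foldl (fun a q => max a (q.1 + (q.2.length : Int))) acc := by
  induction l generalizing acc with
  | nil => simp at hp
  | cons q qs ih =>
    rcases List.mem_cons.mp hp with rfl | hmem
    · exact le_trans (le_max_right _ _) (le_foldl_max _ _)
    · exact ih _ hmem

lemma G_full (img : List (List Int)) (D : Int)
    (hD : ∀ i : Nat, i < img.length → (i:Int) + ((img.getD i []).length : Int) ≤ D) :
    G img D img.length = mark img := by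
  apply List.ext_getElem (by simp [length_G, mark_length])
  intro i h1 h2
  have hi : i < img.length := by simpa [length_G] using h1
  apply List.ext_getElem (by
    have hrl := mark_row_length img i hi
    rw [List.getD_eq_getElem img [] hi] at hrl
    rw [← List.getD_eq_getElem (mark img) [] h2, hrl]
    simp [G])
  intro j hj1 hj2
  have hj : j < (img.getD i []).length := by
    rw [List.getD_eq_getElem img [] hi]
    simpa [G] using hj1
  simp only [G, List.getElem_mapIdx]
  rw [if_pos (Or.inl (by have := hD i hi; omega))]
  unfold mcell
  rw [List.getD_eq_getElem (mark img) [] h2, List.getD_eq_getElem _ 0 hj2]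

lemma alt_eq_mark (img : List (List Int)) : mBlackBottomLeft_alt img = mark img := by
  unfold mBlackBottomLeft_alt
  set D := (PySem.List.enumerate img).foldl (fun acc ir => max acc (ir.1 + (ir.2.length : Int))) 0 with hDdef
  have hD0 : 0 ≤ D := le_foldl_max _ _
  have hDbound : ∀ i : Nat, i < img.length → (i:Int) + ((img.getD i []).length : Int) ≤ D := by
    intro i hi
    have hmem : ((i:Int), img[i]) ∈ PySem.List.enumerate img 0 := by
      rw [PySem.List.mem_enumerate_iff]
      exact ⟨i, hi, by simp⟩
    have := mem_le_foldl_max (PySem.List.enumerate img 0) 0 _ hmem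
    rw [List.getD_eq_getElem img [] hi]
    exact this
  have hcast : D = ((D.toNat : Nat) : Int) := (Int.toNat_of_nonneg hD0).symm
  rw [hcast, outer_inv img D.toNat, G_full img _ (by rw [← hcast]; exact hDbound)]

-- ===== VERDICT (by name: the statement is the Claim_ definition above) =====
theorem mBlackBottomLeft_spec : Claim_equal_mBlackBottomLeft := by
  intro img _ _
  unfold Spec_mBlackBottomLeft
  rw [a_eq_mark, alt_eq_mark]

@[simp] theorem mBlackBottomLeft_raises : Claim_raises_mBlackBottomLeft := by
  unfold Claim_raises_mBlackBottomLeft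
  refine ⟨?_, by decide⟩
  rintro img _ ⟨i, hi, j, hj, h1, h2, h3⟩ hpre
  have := hpre i hi j hj h1 h2
  omega
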